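-- pv_equiv track=rewrite | github.com/sasanokusa/Graduation-research | agents/sensor.py | _build_temporal_evidence
-- ===== SOURCE A (Python) =====
-- from typing import Any
--
-- def _build_temporal_evidence(
--     service_logs: dict[str, str],
--     healthz: dict[str, Any],
--     api_items: dict[str, Any],
--     file_snippets: dict[str, str],
--     relevant_log_excerpts: dict[str, str],
-- ) -> tuple[list[str], list[str]]:
--     current_state_evidence: list[str] = []
--     historical_evidence: list[str] = []
--
--     current_state_evidence.append(f"/healthz currently returns {healthz.get('status')}")
--     current_state_evidence.append(f"/api/items currently returns {api_items.get('status')}")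
--
--     nginx_excerpt = relevant_log_excerpts.get("nginx", "")
--     app_excerpt = relevant_log_excerpts.get("app", "")
--     if "APP_PORT=9000" in file_snippets.get("app/app.env", ""):
--         current_state_evidence.append("visible app env snippet shows APP_PORT=9000")
--     if "DB_PASSWORD=wrongpassword" in file_snippets.get("app/app.env", ""):
--         current_state_evidence.append("visible app env snippet shows a non-baseline DB password")
--     if "server app:8001" in file_snippets.get("nginx/nginx.conf", ""):
--         current_state_evidence.append("visible nginx snippet shows an upstream port mismatch")
--     if "server backend:8000" in file_snippets.get("nginx/nginx.conf", ""):
--         current_state_evidence.append("visible nginx snippet shows an upstream host mismatch")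
--     if "K_ITEMS_QUERY" in file_snippets.get("app/main.py", ""):
--         current_state_evidence.append("visible app code snippet references an indirect query constant")
--     if "itemz" in file_snippets.get("app/main.py", ""):
--         current_state_evidence.append("visible app code snippet references a non-existent table name")
--     if "details" in file_snippets.get("app/main.py", ""):
--         current_state_evidence.append("visible app code snippet references a non-existent column name")
--     if "opaque_items_failure" in app_excerpt:
--         current_state_evidence.append("current app excerpt shows an opaque API failure marker")
--     if any(marker in app_excerpt for marker in ["Unknown column", "doesn't exist", "Access denied", "ModuleNotFoundError"]):
--         current_state_evidence.append("current app excerpt contains a concrete application-side failure marker")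
--     if healthz.get("status") != 200 and any(
--         marker in nginx_excerpt for marker in ["connect() failed", "host not found in upstream", "could not be resolved", "no live upstreams"]
--     ):
--         current_state_evidence.append("current nginx excerpt contains an upstream failure marker")
--
--     nginx_log = service_logs.get("nginx", "")
--     if healthz.get("status") == 200 and "connect() failed" in nginx_log:
--         historical_evidence.append(
--             "recent nginx logs still contain older upstream connection failures even though /healthz currently succeeds"
--         )
--     if healthz.get("status") == 200 and "no live upstreams" in nginx_log:
--         historical_evidence.append(
--             "recent nginx logs still contain older no-live-upstreams errors that do not match the current healthy /healthz state"
--         )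
--     if any(marker in app_excerpt for marker in ["Access denied", "Unknown column", "doesn't exist", "database error"]) and any(
--         marker in nginx_log for marker in ["connect() failed", "host not found in upstream", "could not be resolved", "no live upstreams"]
--     ):
--         historical_evidence.append(
--             "recent nginx logs still contain older upstream failures, but the stronger current evidence is now application-side"
--         )
--
--     return current_state_evidence, historical_evidence
-- ===== SOURCE B (Python) =====
-- from typing import Any
--
-- # B re-expresses the evidence logic as a declarative mini-language: each check is a
-- # condition AST (nested tuples) paired with its message, and a small recursive
-- # interpreter evaluates ASTs against an environment of named texts.
--
-- _UPSTREAM = ["connect() failed", "host not found in upstream", "could not be resolved", "no live upstreams"]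
--
-- # condition forms:
-- #   ("in", needle, src)       needle occurs in the named text
-- #   ("anyin", needles, src)   some needle occurs in the named text
-- #   ("ok",)                   /healthz status == 200
-- #   ("not", cond)             negation
-- #   ("and", c1, c2)           conjunction
-- _CURRENT_RULES = [
--     (("in", "APP_PORT=9000", "app_env"), "visible app env snippet shows APP_PORT=9000"),
--     (("in", "DB_PASSWORD=wrongpassword", "app_env"), "visible app env snippet shows a non-baseline DB password"),
--     (("in", "server app:8001", "nginx_conf"), "visible nginx snippet shows an upstream port mismatch"),
--     (("in", "server backend:8000", "nginx_conf"), "visible nginx snippet shows an upstream host mismatch"),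
--     (("in", "K_ITEMS_QUERY", "main_py"), "visible app code snippet references an indirect query constant"),
--     (("in", "itemz", "main_py"), "visible app code snippet references a non-existent table name"),
--     (("in", "details", "main_py"), "visible app code snippet references a non-existent column name"),
--     (("in", "opaque_items_failure", "app_excerpt"), "current app excerpt shows an opaque API failure marker"),
--     (("anyin", ["Unknown column", "doesn't exist", "Access denied", "ModuleNotFoundError"], "app_excerpt"),
--      "current app excerpt contains a concrete application-side failure marker"),
--     (("and", ("not", ("ok",)), ("anyin", _UPSTREAM, "nginx_excerpt")),
--      "current nginx excerpt contains an upstream failure marker"),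
-- ]
-- _HISTORICAL_RULES = [
--     (("and", ("ok",), ("in", "connect() failed", "nginx_log")),
--      "recent nginx logs still contain older upstream connection failures even though /healthz currently succeeds"),
--     (("and", ("ok",), ("in", "no live upstreams", "nginx_log")),
--      "recent nginx logs still contain older no-live-upstreams errors that do not match the current healthy /healthz state"),
--     (("and", ("anyin", ["Access denied", "Unknown column", "doesn't exist", "database error"], "app_excerpt"),
--       ("anyin", _UPSTREAM, "nginx_log")),
--      "recent nginx logs still contain older upstream failures, but the stronger current evidence is now application-side"),
-- ]
--
--
-- def _build_temporal_evidence(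
--     service_logs: dict[str, str],
--     healthz: dict[str, Any],
--     api_items: dict[str, Any],
--     file_snippets: dict[str, str],
--     relevant_log_excerpts: dict[str, str],
-- ) -> tuple[list[str], list[str]]:
--     env = {
--         "app_env": file_snippets.get("app/app.env", ""),
--         "nginx_conf": file_snippets.get("nginx/nginx.conf", ""),
--         "main_py": file_snippets.get("app/main.py", ""),
--         "nginx_excerpt": relevant_log_excerpts.get("nginx", ""),
--         "app_excerpt": relevant_log_excerpts.get("app", ""),
--         "nginx_log": service_logs.get("nginx", ""),
--     }
--     status = healthz.get("status")
--
--     def ev(cond) -> bool: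
--         op = cond[0]
--         if op == "in":
--             return cond[1] in env[cond[2]]
--         if op == "anyin":
--             return any(n in env[cond[2]] for n in cond[1])
--         if op == "ok":
--             return status == 200
--         if op == "not":
--             return not ev(cond[1])
--         return ev(cond[1]) and ev(cond[2])
--
--     current = [
--         f"/healthz currently returns {status}",
--         f"/api/items currently returns {api_items.get('status')}",
--     ]
--     current += [msg for cond, msg in _CURRENT_RULES if ev(cond)]
--     historical = [msg for cond, msg in _HISTORICAL_RULES if ev(cond)]
--     return current, historical
-- ===== Notes on version B (the rewrite author's own statement) =====
-- stated objective: alternative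
-- what changed: A's inline chain of conditional appends is replaced by a declarative condition mini-language (nested-tuple ASTs with in/anyin/ok/not/and forms) paired with messages, evaluated by a small recursive interpreter over an environment of named texts.
import Mathlib
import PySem

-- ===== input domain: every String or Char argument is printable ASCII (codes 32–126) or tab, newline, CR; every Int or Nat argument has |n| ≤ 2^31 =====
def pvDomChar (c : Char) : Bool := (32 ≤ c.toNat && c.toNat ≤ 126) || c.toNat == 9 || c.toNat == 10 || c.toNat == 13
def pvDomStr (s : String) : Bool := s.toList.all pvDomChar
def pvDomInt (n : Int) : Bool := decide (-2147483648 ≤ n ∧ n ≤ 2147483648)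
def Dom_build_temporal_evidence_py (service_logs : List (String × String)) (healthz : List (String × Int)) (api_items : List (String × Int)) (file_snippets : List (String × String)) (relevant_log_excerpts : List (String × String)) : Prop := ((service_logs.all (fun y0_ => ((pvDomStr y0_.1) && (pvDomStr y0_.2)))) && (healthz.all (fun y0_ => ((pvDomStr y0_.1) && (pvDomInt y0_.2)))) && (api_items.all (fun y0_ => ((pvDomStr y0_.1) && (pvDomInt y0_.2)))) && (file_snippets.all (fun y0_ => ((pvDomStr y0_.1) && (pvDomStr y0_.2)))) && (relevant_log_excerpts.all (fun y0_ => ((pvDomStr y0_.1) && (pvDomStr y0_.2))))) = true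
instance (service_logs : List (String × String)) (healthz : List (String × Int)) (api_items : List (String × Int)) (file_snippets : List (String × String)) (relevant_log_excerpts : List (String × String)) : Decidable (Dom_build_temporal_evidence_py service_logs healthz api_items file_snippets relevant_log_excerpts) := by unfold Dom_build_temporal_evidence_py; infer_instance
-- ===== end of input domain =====

-- B re-expresses the checks as a declarative condition mini-language interpreted by a
-- recursive evaluator (objective: alternative decomposition; same cost).

-- str(x) for x an int-or-None dict lookup (shared formatting helper)
def pyOptIntStr (o : Option Int) : String :=
  match o with
  | none => "None"
  | some n => PySem.Int.toStr n

-- ===== PORT A =====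
def build_temporal_evidence_py (service_logs : List (String × String)) (healthz : List (String × Int)) (api_items : List (String × Int)) (file_snippets : List (String × String)) (relevant_log_excerpts : List (String × String)) : List String × List String :=
  let hz := PySem.Dict.mk healthz
  let ai := PySem.Dict.mk api_items
  let fs := PySem.Dict.mk file_snippets
  let rle := PySem.Dict.mk relevant_log_excerpts
  let sl := PySem.Dict.mk service_logs
  let cse0 : List String := []
  let hist0 : List String := []
  let cse1 := cse0 ++ ["/healthz currently returns " ++ pyOptIntStr (hz.get? "status")]
  let cse2 := cse1 ++ ["/api/items currently returns " ++ pyOptIntStr (ai.get? "status")]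
  let nginx_excerpt := rle.getD "nginx" ""
  let app_excerpt := rle.getD "app" ""
  let cse3 := if PySem.Str.isIn "APP_PORT=9000" (fs.getD "app/app.env" "") then cse2 ++ ["visible app env snippet shows APP_PORT=9000"] else cse2
  let cse4 := if PySem.Str.isIn "DB_PASSWORD=wrongpassword" (fs.getD "app/app.env" "") then cse3 ++ ["visible app env snippet shows a non-baseline DB password"] else cse3
  let cse5 := if PySem.Str.isIn "server app:8001" (fs.getD "nginx/nginx.conf" "") then cse4 ++ ["visible nginx snippet shows an upstream port mismatch"] else cse4
  let cse6 := if PySem.Str.isIn "server backend:8000" (fs.getD "nginx/nginx.conf" "") then cse5 ++ ["visible nginx snippet shows an upstream host mismatch"] else cse5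
  let cse7 := if PySem.Str.isIn "K_ITEMS_QUERY" (fs.getD "app/main.py" "") then cse6 ++ ["visible app code snippet references an indirect query constant"] else cse6
  let cse8 := if PySem.Str.isIn "itemz" (fs.getD "app/main.py" "") then cse7 ++ ["visible app code snippet references a non-existent table name"] else cse7
  let cse9 := if PySem.Str.isIn "details" (fs.getD "app/main.py" "") then cse8 ++ ["visible app code snippet references a non-existent column name"] else cse8
  let cse10 := if PySem.Str.isIn "opaque_items_failure" app_excerpt then cse9 ++ ["current app excerpt shows an opaque API failure marker"] else cse9
  let cse11 := if (["Unknown column", "doesn't exist", "Access denied", "ModuleNotFoundError"].any (fun marker => PySem.Str.isIn marker app_excerpt)) then cse10 ++ ["current app excerpt contains a concrete application-side failure marker"] else cse10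
  let cse12 := if (!(hz.get? "status" == some (200 : Int)) && (["connect() failed", "host not found in upstream", "could not be resolved", "no live upstreams"].any (fun marker => PySem.Str.isIn marker nginx_excerpt))) then cse11 ++ ["current nginx excerpt contains an upstream failure marker"] else cse11
  let nginx_log := sl.getD "nginx" ""
  let hist1 := if ((hz.get? "status" == some (200 : Int)) && PySem.Str.isIn "connect() failed" nginx_log) then hist0 ++ ["recent nginx logs still contain older upstream connection failures even though /healthz currently succeeds"] else hist0
  let hist2 := if ((hz.get? "status" == some (200 : Int)) && PySem.Str.isIn "no live upstreams" nginx_log) then hist1 ++ ["recent nginx logs still contain older no-live-upstreams errors that do not match the current healthy /healthz state"] else hist1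
  let hist3 := if ((["Access denied", "Unknown column", "doesn't exist", "database error"].any (fun marker => PySem.Str.isIn marker app_excerpt)) && (["connect() failed", "host not found in upstream", "could not be resolved", "no live upstreams"].any (fun marker => PySem.Str.isIn marker nginx_log))) then hist2 ++ ["recent nginx logs still contain older upstream failures, but the stronger current evidence is now application-side"] else hist2
  (cse12, hist3)

-- ===== PORT B =====
-- the condition mini-language of Source B (nested tuples become an inductive AST)
inductive PvCond where
  | inC : String → String → PvCond            -- ("in", needle, src)
  | anyIn : List String → String → PvCond     -- ("anyin", needles, src)
  | ok : PvCond                               -- ("ok",): /healthz status == 200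
  | notC : PvCond → PvCond                    -- ("not", c)
  | andC : PvCond → PvCond → PvCond           -- ("and", c1, c2)
deriving Repr, DecidableEq

def pvUpstream : List String := ["connect() failed", "host not found in upstream", "could not be resolved", "no live upstreams"]

def pvCurrentRules : List (PvCond × String) := [
  (.inC "APP_PORT=9000" "app_env", "visible app env snippet shows APP_PORT=9000"),
  (.inC "DB_PASSWORD=wrongpassword" "app_env", "visible app env snippet shows a non-baseline DB password"),
  (.inC "server app:8001" "nginx_conf", "visible nginx snippet shows an upstream port mismatch"),
  (.inC "server backend:8000" "nginx_conf", "visible nginx snippet shows an upstream host mismatch"),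
  (.inC "K_ITEMS_QUERY" "main_py", "visible app code snippet references an indirect query constant"),
  (.inC "itemz" "main_py", "visible app code snippet references a non-existent table name"),
  (.inC "details" "main_py", "visible app code snippet references a non-existent column name"),
  (.inC "opaque_items_failure" "app_excerpt", "current app excerpt shows an opaque API failure marker"),
  (.anyIn ["Unknown column", "doesn't exist", "Access denied", "ModuleNotFoundError"] "app_excerpt", "current app excerpt contains a concrete application-side failure marker"),
  (.andC (.notC .ok) (.anyIn pvUpstream "nginx_excerpt"), "current nginx excerpt contains an upstream failure marker")]

def pvHistoricalRules : List (PvCond × String) := [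
  (.andC .ok (.inC "connect() failed" "nginx_log"), "recent nginx logs still contain older upstream connection failures even though /healthz currently succeeds"),
  (.andC .ok (.inC "no live upstreams" "nginx_log"), "recent nginx logs still contain older no-live-upstreams errors that do not match the current healthy /healthz state"),
  (.andC (.anyIn ["Access denied", "Unknown column", "doesn't exist", "database error"] "app_excerpt") (.anyIn pvUpstream "nginx_log"), "recent nginx logs still contain older upstream failures, but the stronger current evidence is now application-side")]

-- the recursive interpreter 'ev' of Source B
def pvEval (env : PySem.Dict String String) (status : Option Int) : PvCond → Bool
  | .inC n s => PySem.Str.isIn n (env.getD s "")    -- env[src]: all six keys are present, so getD = env lookup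
  | .anyIn ns s => ns.any (fun n => PySem.Str.isIn n (env.getD s ""))
  | .ok => status == some (200 : Int)
  | .notC c => !(pvEval env status c)
  | .andC a b => pvEval env status a && pvEval env status b

-- [msg for cond, msg in rules if ev(cond)]
def pvPick (env : PySem.Dict String String) (status : Option Int) (rules : List (PvCond × String)) : List String :=
  rules.filterMap (fun r => if pvEval env status r.1 then some r.2 else none)

def build_temporal_evidence_py_alt (service_logs : List (String × String)) (healthz : List (String × Int)) (api_items : List (String × Int)) (file_snippets : List (String × String)) (relevant_log_excerpts : List (String × String)) : List String × List String :=
  let env : PySem.Dict String String := PySem.Dict.mk [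
    ("app_env", (PySem.Dict.mk file_snippets).getD "app/app.env" ""),
    ("nginx_conf", (PySem.Dict.mk file_snippets).getD "nginx/nginx.conf" ""),
    ("main_py", (PySem.Dict.mk file_snippets).getD "app/main.py" ""),
    ("nginx_excerpt", (PySem.Dict.mk relevant_log_excerpts).getD "nginx" ""),
    ("app_excerpt", (PySem.Dict.mk relevant_log_excerpts).getD "app" ""),
    ("nginx_log", (PySem.Dict.mk service_logs).getD "nginx" "")]
  let status := (PySem.Dict.mk healthz).get? "status"
  let current := ["/healthz currently returns " ++ pyOptIntStr status,
                  "/api/items currently returns " ++ pyOptIntStr ((PySem.Dict.mk api_items).get? "status")]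
                 ++ pvPick env status pvCurrentRules
  let historical := pvPick env status pvHistoricalRules
  (current, historical)

-- ===== PRECONDITION & SPEC =====
def Spec_build_temporal_evidence_py (service_logs : List (String × String)) (healthz : List (String × Int)) (api_items : List (String × Int)) (file_snippets : List (String × String)) (relevant_log_excerpts : List (String × String)) (out : List String × List String) : Prop := out = build_temporal_evidence_py_alt service_logs healthz api_items file_snippets relevant_log_excerpts
instance (service_logs : List (String × String)) (healthz : List (String × Int)) (api_items : List (String × Int)) (file_snippets : List (String × String)) (relevant_log_excerpts : List (String × String)) (out : List String × List String) : Decidable (Spec_build_temporal_evidence_py service_logs healthz api_items file_snippets relevant_log_excerpts out) := by unfold Spec_build_temporal_evidence_py; infer_instance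

-- ===== CLAIM (what is proved, stated in full; the proofs are below) =====
def Claim_equal_build_temporal_evidence_py : Prop := ∀ (service_logs : List (String × String)) (healthz : List (String × Int)) (api_items : List (String × Int)) (file_snippets : List (String × String)) (relevant_log_excerpts : List (String × String)), Dom_build_temporal_evidence_py service_logs healthz api_items file_snippets relevant_log_excerpts → Spec_build_temporal_evidence_py service_logs healthz api_items file_snippets relevant_log_excerpts (build_temporal_evidence_py service_logs healthz api_items file_snippets relevant_log_excerpts)

-- ===== LEMMAS AND PROOFS =====

-- A's conditional append, rewritten in appended-block form
theorem pv_ite_append (l : List String) (c : Bool) (m : String) :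
    (if c then l ++ [m] else l) = l ++ (if c then [m] else []) := by
  cases c <;> simp

-- B's rule filter, one rule at a time
theorem pvPick_cons (env : PySem.Dict String String) (status : Option Int) (c : PvCond) (m : String) (rs : List (PvCond × String)) :
    pvPick env status ((c, m) :: rs) = (if pvEval env status c then [m] else []) ++ pvPick env status rs := by
  cases h : pvEval env status c <;> simp [pvPick, h]

theorem pvPick_nil (env : PySem.Dict String String) (status : Option Int) : pvPick env status [] = [] := rfl

-- the six lookups in B's literal environment
theorem pvEnv_1 (a b c d e f : String) : (PySem.Dict.mk [("app_env", a), ("nginx_conf", b), ("main_py", c), ("nginx_excerpt", d), ("app_excerpt", e), ("nginx_log", f)]).getD "app_env" "" = a := rfl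
theorem pvEnv_2 (a b c d e f : String) : (PySem.Dict.mk [("app_env", a), ("nginx_conf", b), ("main_py", c), ("nginx_excerpt", d), ("app_excerpt", e), ("nginx_log", f)]).getD "nginx_conf" "" = b := rfl
theorem pvEnv_3 (a b c d e f : String) : (PySem.Dict.mk [("app_env", a), ("nginx_conf", b), ("main_py", c), ("nginx_excerpt", d), ("app_excerpt", e), ("nginx_log", f)]).getD "main_py" "" = c := rfl
theorem pvEnv_4 (a b c d e f : String) : (PySem.Dict.mk [("app_env", a), ("nginx_conf", b), ("main_py", c), ("nginx_excerpt", d), ("app_excerpt", e), ("nginx_log", f)]).getD "nginx_excerpt" "" = d := rfl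
theorem pvEnv_5 (a b c d e f : String) : (PySem.Dict.mk [("app_env", a), ("nginx_conf", b), ("main_py", c), ("nginx_excerpt", d), ("app_excerpt", e), ("nginx_log", f)]).getD "app_excerpt" "" = e := rfl
theorem pvEnv_6 (a b c d e f : String) : (PySem.Dict.mk [("app_env", a), ("nginx_conf", b), ("main_py", c), ("nginx_excerpt", d), ("app_excerpt", e), ("nginx_log", f)]).getD "nginx_log" "" = f := rfl

-- ===== VERDICT (by name: the statement is the Claim_ definition above) =====
theorem build_temporal_evidence_py_spec : Claim_equal_build_temporal_evidence_py := by
  intro service_logs healthz api_items file_snippets relevant_log_excerpts _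
  unfold Spec_build_temporal_evidence_py
  simp only [build_temporal_evidence_py_alt, pvCurrentRules, pvHistoricalRules, pvUpstream,
    pvPick_cons, pvPick_nil, pvEval, pvEnv_1, pvEnv_2, pvEnv_3, pvEnv_4, pvEnv_5, pvEnv_6]
  simp only [build_temporal_evidence_py, pv_ite_append]
  simp only [List.append_assoc, List.nil_append, List.append_nil, List.cons_append]
  rfl
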